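-- pv_equiv track=rewrite | github.com/puraminy/ibmss | request.py | find
-- ===== SOURCE A (Python) =====
-- def find(list, st, ch, default):
--     str = st + ch
--     for i, item in enumerate(list):
--         if item.startswith(str):
--             return i,str
--     for i, item in enumerate(list):
--         if item.startswith(ch):
--             return i,ch
--     return default,""
-- ===== SOURCE B (Python) =====
-- def find(list, st, ch, default):
--     str = st + ch
--     fallback = None
--     for i, item in enumerate(list):
--         if item.startswith(str):
--             return i, str
--         if fallback is None and item.startswith(ch):
--             fallback = i
--     if fallback is not None:
--         return fallback, ch
--     return default, ""
-- ===== Notes on version B (the rewrite author's own statement) =====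
-- stated objective: alternative
-- what changed: Replaces A's two sequential scans of the list by a single pass that returns on the first st+ch match and carries the index of the first ch-only match as a fallback accumulator.
import Mathlib
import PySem

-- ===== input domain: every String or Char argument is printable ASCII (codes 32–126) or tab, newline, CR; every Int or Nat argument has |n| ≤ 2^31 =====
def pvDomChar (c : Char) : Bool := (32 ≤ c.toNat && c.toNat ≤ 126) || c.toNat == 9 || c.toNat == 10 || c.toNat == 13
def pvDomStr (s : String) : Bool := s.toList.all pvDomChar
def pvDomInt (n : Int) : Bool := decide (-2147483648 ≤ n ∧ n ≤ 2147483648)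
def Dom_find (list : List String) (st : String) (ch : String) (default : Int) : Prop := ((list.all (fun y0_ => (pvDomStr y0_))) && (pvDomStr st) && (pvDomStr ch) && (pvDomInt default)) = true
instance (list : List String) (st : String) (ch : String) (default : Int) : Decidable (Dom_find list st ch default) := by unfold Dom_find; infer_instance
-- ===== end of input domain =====

-- B merges A's two sequential scans into one pass that carries the first ch-match index as a fallback accumulator; same return value everywhere (alternative decomposition).

-- ===== PORT A =====
-- helper: one 'for i, item in enumerate(list): if item.startswith(p): return i, p' scan
def findScanA (l : List String) (i : Int) (p : String) : Option (Int × String) :=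
  match l with
  | [] => none
  | x :: xs => if PySem.Str.startswith x p then some (i, p) else findScanA xs (i + 1) p

def find (list : List String) (st : String) (ch : String) (default : Int) : Int × String :=
  let str := st ++ ch
  match findScanA list 0 str with
  | some r => r
  | none =>
    match findScanA list 0 ch with
    | some r => r
    | none => (default, "")

-- ===== PORT B =====
-- helper: the single enumerate loop of Source B, carrying the fallback accumulator
def findLoopB (l : List String) (i : Int) (str ch : String) (fb : Option Int) (default : Int) : Int × String :=
  match l with
  | [] =>
    match fb with
    | some j => (j, ch)
    | none => (default, "")
  | x :: xs =>
    if PySem.Str.startswith x str then (i, str)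
    else findLoopB xs (i + 1) str ch
      (if fb.isNone && PySem.Str.startswith x ch then some i else fb) default

def find_alt (list : List String) (st : String) (ch : String) (default : Int) : Int × String :=
  findLoopB list 0 (st ++ ch) ch none default

-- ===== PRECONDITION & SPEC =====
def Spec_find (list : List String) (st : String) (ch : String) (default : Int) (out : Int × String) : Prop := out = find_alt list st ch default
instance (list : List String) (st : String) (ch : String) (default : Int) (out : Int × String) : Decidable (Spec_find list st ch default out) := by unfold Spec_find; infer_instance

-- ===== CLAIM (what is proved, stated in full; the proofs are below) =====
def Claim_equal_find : Prop := ∀ (list : List String) (st : String) (ch : String) (default : Int), Dom_find list st ch default → Spec_find list st ch default (find list st ch default)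

-- ===== LEMMAS AND PROOFS =====

-- the single pass with fallback computes A's two-scan result
theorem findLoopB_eq (l : List String) (str ch : String) (d : Int) :
    ∀ (i : Int) (fb : Option Int),
      findLoopB l i str ch fb d =
        (match findScanA l i str with
         | some r => r
         | none =>
           match fb with
           | some j => (j, ch)
           | none =>
             match findScanA l i ch with
             | some r => r
             | none => (d, "")) := by
  induction l with
  | nil => intro i fb; rfl
  | cons x xs ih =>
    intro i fb
    by_cases hs : PySem.Chars.startswith x.toList str.toList = true
    · simp [findLoopB, findScanA, hs]
    · by_cases hc : PySem.Chars.startswith x.toList ch.toList = true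
      · cases fb with
        | none => simp [findLoopB, findScanA, hs, hc, ih]
        | some j => simp [findLoopB, findScanA, hs, hc, ih]
      · cases fb with
        | none => simp [findLoopB, findScanA, hs, hc, ih]
        | some j => simp [findLoopB, findScanA, hs, hc, ih]

-- ===== VERDICT (by name: the statement is the Claim_ definition above) =====
theorem find_spec : Claim_equal_find := by
  intro list st ch default _
  unfold Spec_find find find_alt
  rw [findLoopB_eq]
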